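-- pv_equiv track=rewrite | github.com/Neuvoo/legacy-portage | pym/portage/util/__init__.py | stack_dicts
-- ===== SOURCE A (Python) =====
-- def stack_dicts(dicts, incremental=0, incrementals=[], ignore_none=0):
-- 	"""Stacks an array of dict-types into one array. Optionally merging or
-- 	overwriting matching key/value pairs for the dict[key]->string.
-- 	Returns a single dict."""
-- 	final_dict = {}
-- 	for mydict in dicts:
-- 		if not mydict:
-- 			continue
-- 		for k, v in mydict.items():
-- 			if k in final_dict and (incremental or (k in incrementals)):
-- 				final_dict[k] += " " + v
-- 			else:
-- 				final_dict[k]  = v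
-- 	return final_dict
-- ===== SOURCE B (Python) =====
-- def stack_dicts(dicts, incremental=0, incrementals=[], ignore_none=0):
--     # Two-pass: group every value per key (first-encounter order), then
--     # combine each group once: fold with ' ' for incremental keys, last value otherwise.
--     groups = {}
--     for mydict in dicts:
--         if not mydict:
--             continue
--         for k, v in mydict.items():
--             groups.setdefault(k, []).append(v)
--     final_dict = {}
--     for k, vals in groups.items():
--         if incremental or (k in incrementals):
--             acc = vals[0]
--             for v in vals[1:]:
--                 acc += " " + v
--             final_dict[k] = acc
--         else:
--             final_dict[k] = vals[-1]
--     return final_dict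
-- ===== Notes on version B (the rewrite author's own statement) =====
-- stated objective: alternative
-- what changed: Replaces A's single merge loop that conditionally concatenates into the result dict as it goes with a two-pass decomposition: first group all values per key in encounter order, then combine each key's group once (seed+fold join for incremental keys, last value otherwise).
import Mathlib
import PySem

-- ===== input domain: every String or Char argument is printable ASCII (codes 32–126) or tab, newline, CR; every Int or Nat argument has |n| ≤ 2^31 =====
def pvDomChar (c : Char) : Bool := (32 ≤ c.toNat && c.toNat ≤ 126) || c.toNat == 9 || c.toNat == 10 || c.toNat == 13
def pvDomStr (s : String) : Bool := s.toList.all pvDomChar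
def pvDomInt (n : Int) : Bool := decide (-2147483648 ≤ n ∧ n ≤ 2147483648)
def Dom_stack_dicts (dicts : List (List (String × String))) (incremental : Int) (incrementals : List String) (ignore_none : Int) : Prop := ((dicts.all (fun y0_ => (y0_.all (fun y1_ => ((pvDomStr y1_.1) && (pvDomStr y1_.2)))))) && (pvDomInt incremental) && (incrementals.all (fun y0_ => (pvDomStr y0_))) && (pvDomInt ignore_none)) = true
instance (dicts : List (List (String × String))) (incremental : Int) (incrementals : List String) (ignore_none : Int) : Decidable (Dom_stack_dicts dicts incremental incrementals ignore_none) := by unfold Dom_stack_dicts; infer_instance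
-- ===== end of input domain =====

-- B replaces A's incremental merge-as-you-go loop by a two-pass decomposition (group values per key, then combine each group once); same results, no speed claim.


-- ===== PORT A =====
-- A: one pass over all dicts; existing incremental keys get " "+v appended, others are (re)set.
def stack_dicts (dicts : List (List (String × String))) (incremental : Int) (incrementals : List String) (ignore_none : Int) : List (String × String) :=
  let final_dict : PySem.Dict String String :=
    dicts.foldl (fun fd mydict =>
      if mydict.isEmpty then fd
      else mydict.foldl (fun fd kv =>
        if fd.contains kv.1 && (decide (incremental ≠ 0) || incrementals.contains kv.1) then
          fd.insert kv.1 (fd.getD kv.1 "" ++ " " ++ kv.2)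
        else
          fd.insert kv.1 kv.2) fd) PySem.Dict.empty
  final_dict.items

-- ===== PORT B =====
-- B: pass 1 groups every value under its key (first-encounter order);
-- pass 2 combines each group once: fold-join for incremental keys, else last value.
-- vals[0] / vals[-1] are totalised with a default ("" ) that is never reached: groups are nonempty.
def stack_dicts_alt (dicts : List (List (String × String))) (incremental : Int) (incrementals : List String) (ignore_none : Int) : List (String × String) :=
  let groups : PySem.Dict String (List String) :=
    dicts.foldl (fun g mydict =>
      if mydict.isEmpty then g
      else mydict.foldl (fun g kv => g.modify kv.1 [] (fun vs => vs ++ [kv.2])) g) PySem.Dict.empty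
  let final_dict : PySem.Dict String String :=
    groups.items.foldl (fun r kvs =>
      if decide (incremental ≠ 0) || incrementals.contains kvs.1 then
        r.insert kvs.1 ((kvs.2.drop 1).foldl (fun acc v => acc ++ " " ++ v) (kvs.2.headD ""))
      else
        r.insert kvs.1 (kvs.2.getLastD "")) PySem.Dict.empty
  final_dict.items

-- ===== PRECONDITION & SPEC =====
def Spec_stack_dicts (dicts : List (List (String × String))) (incremental : Int) (incrementals : List String) (ignore_none : Int) (out : List (String × String)) : Prop := out = stack_dicts_alt dicts incremental incrementals ignore_none
instance (dicts : List (List (String × String))) (incremental : Int) (incrementals : List String) (ignore_none : Int) (out : List (String × String)) : Decidable (Spec_stack_dicts dicts incremental incrementals ignore_none out) := by unfold Spec_stack_dicts; infer_instance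

-- ===== CLAIM (what is proved, stated in full; the proofs are below) =====
def Claim_equal_stack_dicts : Prop := ∀ (dicts : List (List (String × String))) (incremental : Int) (incrementals : List String) (ignore_none : Int), Dom_stack_dicts dicts incremental incrementals ignore_none → Spec_stack_dicts dicts incremental incrementals ignore_none (stack_dicts dicts incremental incrementals ignore_none)

-- ===== LEMMAS AND PROOFS =====

-- How B combines one key's grouped values (the body of B's second pass).
def pvCombine (C : String → Bool) (k : String) (vs : List String) : String :=
  if C k then (vs.drop 1).foldl (fun acc v => acc ++ " " ++ v) (vs.headD "") else vs.getLastD ""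

-- An `if not mydict: continue` outer loop over sub-lists is the loop over the flattened list.
theorem pv_fold_guard_flatten {sigma : Type} (f : sigma → (String × String) → sigma) (dicts : List (List (String × String))) (init : sigma) :
    dicts.foldl (fun g mydict => if mydict.isEmpty then g else mydict.foldl f g) init
      = dicts.flatten.foldl f init := by
  have hfun : (fun (g : sigma) (mydict : List (String × String)) => if mydict.isEmpty then g else mydict.foldl f g)
      = fun g mydict => mydict.foldl f g := by
    funext g mydict; cases mydict <;> rfl
  rw [hfun, List.foldl_flatten]

-- A's two-branch body is a single insert with a conditional value.
theorem pv_stepA_eq (C : String → Bool) :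
    (fun (fd : PySem.Dict String String) (kv : String × String) =>
        if fd.contains kv.1 && C kv.1 then fd.insert kv.1 (fd.getD kv.1 "" ++ " " ++ kv.2)
        else fd.insert kv.1 kv.2)
      = fun fd kv => fd.insert kv.1 (if fd.contains kv.1 && C kv.1 then fd.getD kv.1 "" ++ " " ++ kv.2 else kv.2) := by
  funext fd kv; split <;> rfl

-- B's two-branch second-pass body is a single insert with a conditional value.
theorem pv_stepB_eq (C : String → Bool) :
    (fun (r : PySem.Dict String String) (kvs : String × List String) =>
        if C kvs.1 then r.insert kvs.1 ((kvs.2.drop 1).foldl (fun acc v => acc ++ " " ++ v) (kvs.2.headD ""))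
        else r.insert kvs.1 (kvs.2.getLastD ""))
      = fun r kvs => r.insert kvs.1 (pvCombine C kvs.1 kvs.2) := by
  funext r kvs; unfold pvCombine; split <;> rfl

theorem pv_filter_ne_nil {l : List (String × String)} {k : String} (h : k ∈ l.map Prod.fst) :
    l.filter (fun p => p.1 == k) ≠ [] := by
  simp only [ne_eq, List.filter_eq_nil_iff, not_forall]
  obtain ⟨p, hp, rfl⟩ := List.mem_map.1 h
  exact ⟨p, hp, by simp⟩

theorem pv_filter_eq_nil {l : List (String × String)} {k : String} (h : k ∉ l.map Prod.fst) :
    l.filter (fun p => p.1 == k) = [] := by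
  simp only [List.filter_eq_nil_iff]
  intro p hp hbeq
  exact h (List.mem_map.2 ⟨p, hp, by simpa using hbeq⟩)

-- With unique keys, a dict's items list is its keys paired with their values.
theorem pv_items_eq_keys_map {v : Type} (d : PySem.Dict String v) (d0 : v) (h : d.keys.Nodup) :
    d.items = d.keys.map (fun k => (k, d.getD k d0)) := by
  show d.items = (d.items.map Prod.fst).map _
  rw [List.map_map]
  conv_lhs => rw [← List.map_id d.items]
  apply List.map_congr_left
  intro p hp
  obtain ⟨a, b⟩ := p
  simp [PySem.Dict.getD_of_mem_items d hp h]

-- The keys of A's merge loop, in first-encounter order.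
theorem pv_keysA (C : String → Bool) (l : List (String × String)) :
    (l.foldl (fun fd kv => fd.insert kv.1 (if fd.contains kv.1 && C kv.1 then fd.getD kv.1 "" ++ " " ++ kv.2 else kv.2)) PySem.Dict.empty).keys
      = PySem.Set.ofList (l.map Prod.fst) := by
  rw [PySem.Dict.keys_foldl_insert_key l Prod.fst
      (fun fd kv => if fd.contains kv.1 && C kv.1 then fd.getD kv.1 "" ++ " " ++ kv.2 else kv.2) PySem.Dict.empty]
  rfl

-- The value A's merge loop ends with at key k is pvCombine of all values listed under k.
theorem pv_getD_A (C : String → Bool) (l : List (String × String)) (k : String) (hk : k ∈ l.map Prod.fst) :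
    (l.foldl (fun fd kv => fd.insert kv.1 (if fd.contains kv.1 && C kv.1 then fd.getD kv.1 "" ++ " " ++ kv.2 else kv.2)) PySem.Dict.empty).getD k ""
      = pvCombine C k ((l.filter (fun p => p.1 == k)).map Prod.snd) := by
  induction l using List.reverseRecOn with
  | nil => simp at hk
  | append_singleton l p ih =>
    rw [List.foldl_append, List.foldl_cons, List.foldl_nil]
    set G := l.foldl (fun fd kv => fd.insert kv.1 (if fd.contains kv.1 && C kv.1 then fd.getD kv.1 "" ++ " " ++ kv.2 else kv.2)) PySem.Dict.empty with hG
    by_cases hpk : p.1 = k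
    · -- the new pair lands on key k
      rw [hpk, PySem.Dict.getD_insert_self]
      have hcont : G.contains k = decide (k ∈ l.map Prod.fst) := by
        rw [PySem.Dict.contains_eq_decide_mem_keys, pv_keysA]
        simp [PySem.Set.mem_ofList]
      have hfilt : (l ++ [p]).filter (fun q => q.1 == k) = l.filter (fun q => q.1 == k) ++ [p] := by
        simp [List.filter_append, hpk]
      by_cases hm : k ∈ l.map Prod.fst
      · have hvs := pv_filter_ne_nil hm
        rw [hcont, hfilt]
        simp only [hm, decide_true, Bool.true_and]
        by_cases hc : C k = true
        · rw [hc, if_pos rfl, ih hm]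
          unfold pvCombine
          rw [if_pos hc, if_pos hc]
          obtain ⟨w, ws, hws⟩ := List.exists_cons_of_ne_nil hvs
          rw [List.map_append, hws]
          simp [List.foldl_append]
        · rw [Bool.not_eq_true] at hc
          rw [hc, if_neg (by simp)]
          unfold pvCombine
          simp [hc]
      · have hcf : G.contains k = false := by rw [hcont]; simp [hm]
        rw [hcf, if_neg (by simp), hfilt, pv_filter_eq_nil hm]
        unfold pvCombine
        cases hC : C k <;> simp
    · -- a different key: state at k unchanged
      have hne : k ≠ p.1 := fun h => hpk h.symm
      rw [PySem.Dict.getD_insert_of_ne G _ _ hne]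
      have hkl : k ∈ l.map Prod.fst := by
        rcases List.mem_map.1 hk with ⟨q, hq, rfl⟩
        rcases List.mem_append.1 hq with h1 | h1
        · exact List.mem_map.2 ⟨q, h1, rfl⟩
        · simp at h1; exact absurd (congrArg Prod.fst h1).symm hpk
      have hfilt : (l ++ [p]).filter (fun q => q.1 == k) = l.filter (fun q => q.1 == k) := by
        simp [List.filter_append, hpk]
      rw [hfilt, ih hkl]

theorem stack_dicts_main : ∀ (dicts : List (List (String × String))) (incremental : Int) (incrementals : List String) (ignore_none : Int), stack_dicts dicts incremental incrementals ignore_none = stack_dicts_alt dicts incremental incrementals ignore_none := by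
  intro dicts incremental incrementals ignore_none
  simp only [stack_dicts, stack_dicts_alt]
  rw [pv_fold_guard_flatten, pv_fold_guard_flatten,
      pv_stepA_eq (fun k => decide (incremental ≠ 0) || incrementals.contains k),
      pv_stepB_eq (fun k => decide (incremental ≠ 0) || incrementals.contains k)]
  set C : String → Bool := fun k => decide (incremental ≠ 0) || incrementals.contains k with hC
  set flat := dicts.flatten with hflat
  set DA := flat.foldl (fun fd kv => fd.insert kv.1 (if fd.contains kv.1 && C kv.1 then fd.getD kv.1 "" ++ " " ++ kv.2 else kv.2)) PySem.Dict.empty with hDA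
  set GG := flat.foldl (fun g kv => g.modify kv.1 [] (fun vs => vs ++ [kv.2])) PySem.Dict.empty with hGG
  have hkA : DA.keys = PySem.Set.ofList (flat.map Prod.fst) := pv_keysA C flat
  have hkG : GG.keys = PySem.Set.ofList (flat.map Prod.fst) := by
    rw [hGG, PySem.Dict.keys_foldl_modify_key flat Prod.fst [] (fun g kv vs => vs ++ [kv.2]) PySem.Dict.empty]
    rfl
  have hnA : DA.keys.Nodup := PySem.Dict.nodup_keys_foldl_insert_key _ _ _ _ (by simp [PySem.Dict.keys_empty])
  have hnG : GG.keys.Nodup := PySem.Dict.nodup_keys_foldl_modify_key _ _ _ _ _ (by simp [PySem.Dict.keys_empty])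
  rw [PySem.Dict.items_foldl_insert_fresh GG.items Prod.fst (fun kvs => pvCombine C kvs.1 kvs.2) PySem.Dict.empty
        (fun a _ => by simp [PySem.Dict.contains_empty]) hnG]
  rw [pv_items_eq_keys_map DA "" hnA, pv_items_eq_keys_map GG ([] : List String) hnG, List.map_map]
  rw [hkA, hkG]
  show _ = List.map _ _
  apply List.map_congr_left
  intro k hkmem
  have hkin : k ∈ flat.map Prod.fst := (PySem.Set.mem_ofList _ _).1 hkmem
  have hg : GG.getD k [] = (flat.filter (fun p => p.1 == k)).map Prod.snd := by
    rw [hGG, PySem.Dict.getD_foldl_modify_append flat PySem.Dict.empty k]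
    simp [PySem.Dict.getD_empty]
  simp only [Function.comp_apply, hg]
  rw [pv_getD_A C flat k hkin]

-- ===== VERDICT (by name: the statement is the Claim_ definition above) =====
theorem stack_dicts_spec : Claim_equal_stack_dicts := by
  intro dicts incremental incrementals ignore_none _
  unfold Spec_stack_dicts
  exact stack_dicts_main dicts incremental incrementals ignore_none
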